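-- pv_equiv track=rewrite | github.com/arthurnguyen510/GoogleCodeJam | 2016/Round 1B/A/Getting_the_Digits.py | number_inside
-- ===== SOURCE A (Python) =====
-- def number_inside(number, check_number):
--     check = check_number
--     original_number = number
--     for letter in original_number:
--         if len(check):
--             for iter_letter in range(len(check)):
--                 if check[iter_letter] == letter:
--                     check = check[:iter_letter] + check[iter_letter + 1:]
--                     break
--
--     if not len(check):
--         for letter in check_number:
--             for iter_letter in range(len(original_number)):
--                 if letter == original_number[iter_letter]:
--                     original_number = original_number[:iter_letter] + original_number[iter_letter + 1:]
--                     break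
--         return True, original_number
--     return False, original_number
-- ===== SOURCE B (Python) =====
-- def number_inside(number, check_number):
--     need = {}
--     for c in check_number:
--         need[c] = need.get(c, 0) + 1
--     remaining = len(check_number)
--     out = []
--     for c in number:
--         if need.get(c, 0) > 0:
--             need[c] -= 1
--             remaining -= 1
--         else:
--             out.append(c)
--     if remaining:
--         return False, number
--     return True, ''.join(out)
-- ===== Notes on version B (the rewrite author's own statement) =====
-- stated objective: faster
-- what changed: Replaces A's repeated linear scans (inner scan of the shrinking check string per character, then a second nested removal pass over the number) with one counting-dict pass: build char counts of check_number, then a single traversal of number that consumes counts and collects the leftover characters, with a remaining total deciding coverage.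
import Mathlib
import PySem

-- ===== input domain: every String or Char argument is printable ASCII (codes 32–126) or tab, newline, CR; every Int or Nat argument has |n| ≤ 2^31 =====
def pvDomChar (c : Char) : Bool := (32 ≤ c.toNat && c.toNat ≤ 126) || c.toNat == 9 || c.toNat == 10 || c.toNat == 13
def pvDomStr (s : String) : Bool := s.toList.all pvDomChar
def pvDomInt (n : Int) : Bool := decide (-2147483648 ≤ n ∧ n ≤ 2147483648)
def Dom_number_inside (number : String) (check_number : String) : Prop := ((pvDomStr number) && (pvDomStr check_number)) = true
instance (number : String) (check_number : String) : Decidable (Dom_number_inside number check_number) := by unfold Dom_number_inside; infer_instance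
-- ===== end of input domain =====

-- B replaces A's nested rescans with one counting-dict pass over the number: a faster single-pass re-implementation.

-- ===== PORT A =====
-- inner `for iter_letter in range(len(check)) … break`: remove the first occurrence of `letter` (slicing check[:i]+check[i+1:])
def pvRemoveFirst (xs : List Char) (letter : Char) : List Char :=
  match xs with
  | [] => []
  | c :: rest => if c = letter then rest else c :: pvRemoveFirst rest letter

def number_inside (number : String) (check_number : String) : Bool × String :=
  let original_number := number.toList
  let check := original_number.foldl
      (fun check letter => if check.length ≠ 0 then pvRemoveFirst check letter else check)
      check_number.toList
  if check.length = 0 then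
    let original_number := check_number.toList.foldl
        (fun orig letter => pvRemoveFirst orig letter) original_number
    (true, String.ofList original_number)
  else (false, String.ofList original_number)

-- ===== PORT B =====
def number_inside_alt (number : String) (check_number : String) : Bool × String :=
  let need := check_number.toList.foldl
      (fun (d : PySem.Dict Char Int) c => d.insert c (d.getD c 0 + 1)) PySem.Dict.empty
  let st := number.toList.foldl
      (fun (s : PySem.Dict Char Int × Int × List Char) c =>
        if s.1.getD c 0 > 0 then (s.1.insert c (s.1.getD c 0 - 1), s.2.1 - 1, s.2.2)
        else (s.1, s.2.1, s.2.2 ++ [c]))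
      (need, (PySem.Str.len check_number : Int), ([] : List Char))
  if st.2.1 ≠ 0 then (false, number) else (true, String.ofList st.2.2)

-- ===== PRECONDITION & SPEC =====
def Spec_number_inside (number : String) (check_number : String) (out : Bool × String) : Prop := out = number_inside_alt number check_number
instance (number : String) (check_number : String) (out : Bool × String) : Decidable (Spec_number_inside number check_number out) := by unfold Spec_number_inside; infer_instance

-- ===== CLAIM (what is proved, stated in full; the proofs are below) =====
def Claim_equal_number_inside : Prop := ∀ (number : String) (check_number : String), Dom_number_inside number check_number → Spec_number_inside number check_number (number_inside number check_number)

-- ===== LEMMAS AND PROOFS =====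

theorem pvRemoveFirst_of_not_mem (xs : List Char) (a : Char) (h : a ∉ xs) :
    pvRemoveFirst xs a = xs := by
  induction xs with
  | nil => rfl
  | cons x rest ih =>
    simp only [List.mem_cons, not_or] at h
    simp [pvRemoveFirst, Ne.symm h.1, ih h.2]

theorem pvCount_removeFirst_self (xs : List Char) (a : Char) (h : a ∈ xs) :
    (pvRemoveFirst xs a).count a + 1 = xs.count a := by
  induction xs with
  | nil => cases h
  | cons x rest ih =>
    by_cases hx : x = a
    · subst hx; simp [pvRemoveFirst]
    · have : a ∈ rest := by
        rcases List.mem_cons.mp h with h' | h'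
        · exact absurd h'.symm hx
        · exact h'
      simp [pvRemoveFirst, hx, ih this]

theorem pvCount_removeFirst_ne (xs : List Char) (a c : Char) (h : c ≠ a) :
    (pvRemoveFirst xs a).count c = xs.count c := by
  induction xs with
  | nil => rfl
  | cons x rest ih =>
    by_cases hx : x = a
    · subst hx; simp [pvRemoveFirst, Ne.symm h]
    · simp [pvRemoveFirst, hx, List.count_cons, ih]

theorem pvLength_removeFirst (xs : List Char) (a : Char) (h : a ∈ xs) :
    (pvRemoveFirst xs a).length + 1 = xs.length := by
  induction xs with
  | nil => cases h
  | cons x rest ih =>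
    by_cases hx : x = a
    · subst hx; simp [pvRemoveFirst]
    · have : a ∈ rest := by
        rcases List.mem_cons.mp h with h' | h'
        · exact absurd h'.symm hx
        · exact h'
      simp [pvRemoveFirst, hx, ih this]

-- the one-pass "quota filter": keep a char iff its remaining quota is 0, else consume it
def pvKept : List Char → (Char → Nat) → List Char
  | [], _ => []
  | x :: xs, f =>
    if f x > 0 then pvKept xs (fun c => if c = x then f c - 1 else f c)
    else x :: pvKept xs f

theorem pvKept_zero (xs : List Char) (f : Char → Nat) (h : ∀ c, f c = 0) :
    pvKept xs f = xs := by
  induction xs with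
  | nil => rfl
  | cons x rest ih => simp [pvKept, h x, ih]

theorem pvKept_cons (x : Char) (xs : List Char) (f : Char → Nat) :
    pvKept (x :: xs) f
      = if f x > 0 then pvKept xs (fun c => if c = x then f c - 1 else f c)
        else x :: pvKept xs f := rfl

theorem pvKept_bump (xs : List Char) (f : Char → Nat) (a : Char) :
    pvKept xs (fun c => if c = a then f c + 1 else f c) = pvKept (pvRemoveFirst xs a) f := by
  induction xs generalizing f with
  | nil => rfl
  | cons x rest ih =>
    by_cases hx : x = a
    · subst hx
      have e1 : pvRemoveFirst (x :: rest) x = rest := by simp [pvRemoveFirst]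
      rw [e1, pvKept_cons, if_pos (by simp)]
      have : (fun c => if c = x then (if c = x then f c + 1 else f c) - 1 else if c = x then f c + 1 else f c) = f := by
        funext c; by_cases hc : c = x <;> simp [hc]
      rw [this]
    · have e1 : pvRemoveFirst (x :: rest) a = x :: pvRemoveFirst rest a := by
        simp [pvRemoveFirst, hx]
      rw [e1, pvKept_cons, pvKept_cons]
      have hxa : (if x = a then f x + 1 else f x) = f x := by simp [hx]
      rw [hxa]
      by_cases hfx : f x > 0
      · rw [if_pos hfx, if_pos hfx]
        have : (fun c => if c = x then (if c = a then f c + 1 else f c) - 1 else if c = a then f c + 1 else f c)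
             = (fun c => if c = a then (if c = x then f c - 1 else f c) + 1 else if c = x then f c - 1 else f c) := by
          funext c
          by_cases hc : c = x
          · subst hc; simp [hx]
          · by_cases hca : c = a
            · simp [hca, show ¬a = x from fun h => hx h.symm]
            · simp [hc, hca]
        rw [this, ih]
      · rw [if_neg hfx, if_neg hfx, ih f]

theorem pvFold_removeFirst_eq_kept (cs xs : List Char) :
    cs.foldl (fun orig letter => pvRemoveFirst orig letter) xs
      = pvKept xs (fun c => cs.count c) := by
  induction cs generalizing xs with
  | nil =>
    simp only [List.foldl_nil]
    exact (pvKept_zero xs _ (fun c => by simp)).symm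
  | cons a cs' ih =>
    simp only [List.foldl_cons]
    rw [ih (pvRemoveFirst xs a), ← pvKept_bump]
    congr 1
    funext c
    by_cases hc : c = a
    · simp [hc]
    · simp [hc, Ne.symm hc]

-- joint invariant over the pass on `number`: A's shrinking check list vs B's (dict, remaining, out) state
theorem pvJoint (xs : List Char) (check : List Char) (d : PySem.Dict Char Int) (rem : Int) (out : List Char)
    (hcnt : ∀ c, (check.count c : Int) = d.getD c 0) (hlen : (check.length : Int) = rem) :
    (∀ c, ((xs.foldl (fun check letter => if check.length ≠ 0 then pvRemoveFirst check letter else check) check).count c : Int)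
        = (xs.foldl (fun (s : PySem.Dict Char Int × Int × List Char) c =>
            if s.1.getD c 0 > 0 then (s.1.insert c (s.1.getD c 0 - 1), s.2.1 - 1, s.2.2)
            else (s.1, s.2.1, s.2.2 ++ [c])) (d, rem, out)).1.getD c 0)
  ∧ (((xs.foldl (fun check letter => if check.length ≠ 0 then pvRemoveFirst check letter else check) check).length : Int)
        = (xs.foldl (fun (s : PySem.Dict Char Int × Int × List Char) c =>
            if s.1.getD c 0 > 0 then (s.1.insert c (s.1.getD c 0 - 1), s.2.1 - 1, s.2.2)
            else (s.1, s.2.1, s.2.2 ++ [c])) (d, rem, out)).2.1)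
  ∧ ((xs.foldl (fun (s : PySem.Dict Char Int × Int × List Char) c =>
            if s.1.getD c 0 > 0 then (s.1.insert c (s.1.getD c 0 - 1), s.2.1 - 1, s.2.2)
            else (s.1, s.2.1, s.2.2 ++ [c])) (d, rem, out)).2.2
        = out ++ pvKept xs (fun c => check.count c)) := by
  induction xs generalizing check d rem out with
  | nil => simpa [pvKept] using ⟨hcnt, hlen⟩
  | cons x xs' ih =>
    simp only [List.foldl_cons]
    by_cases hx : 0 < check.count x
    · have hmem : x ∈ check := List.count_pos_iff.mp hx
      have hgd : d.getD x 0 > 0 := by rw [← hcnt x]; exact_mod_cast hx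
      have hne : check.length ≠ 0 := by
        intro h0; rw [List.length_eq_zero_iff] at h0; subst h0; cases hmem
      rw [if_pos hne, if_pos hgd]
      have hcnt' : ∀ c, (((pvRemoveFirst check x).count c : Int)) = (d.insert x (d.getD x 0 - 1)).getD c 0 := by
        intro c
        by_cases hc : c = x
        · subst hc
          rw [PySem.Dict.getD_insert_self, ← hcnt c]
          have := pvCount_removeFirst_self check c hmem
          omega
        · rw [PySem.Dict.getD_insert, if_neg hc, pvCount_removeFirst_ne check x c hc, hcnt c]
      have hlen' : (((pvRemoveFirst check x).length : Int)) = rem - 1 := by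
        have := pvLength_removeFirst check x hmem; omega
      obtain ⟨h1, h2, h3⟩ := ih (pvRemoveFirst check x) _ _ out hcnt' hlen'
      refine ⟨h1, h2, ?_⟩
      rw [h3]
      have : pvKept (x :: xs') (fun c => check.count c)
           = pvKept xs' (fun c => (pvRemoveFirst check x).count c) := by
        rw [pvKept_cons, if_pos hx]
        congr 1
        funext c
        by_cases hc : c = x
        · subst hc
          have := pvCount_removeFirst_self check c hmem
          simp only [if_pos]
          omega
        · simp [hc, pvCount_removeFirst_ne check x c hc]
      rw [this]
    · have hcx : check.count x = 0 := by omega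
      have hmem : x ∉ check := by
        intro hm; exact hx (List.count_pos_iff.mpr hm)
      have hgd : ¬ d.getD x 0 > 0 := by
        rw [← hcnt x, hcx]; simp
      rw [if_neg hgd]
      have hstep : (if check.length ≠ 0 then pvRemoveFirst check x else check) = check := by
        by_cases h0 : check.length ≠ 0
        · rw [if_pos h0, pvRemoveFirst_of_not_mem check x hmem]
        · rw [if_neg h0]
      rw [hstep]
      obtain ⟨h1, h2, h3⟩ := ih check d rem (out ++ [x]) hcnt hlen
      refine ⟨h1, h2, ?_⟩
      rw [h3]
      rw [pvKept_cons, if_neg (by omega)]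
      simp [List.append_assoc]

-- ===== VERDICT (by name: the statement is the Claim_ definition above) =====
theorem number_inside_spec : Claim_equal_number_inside := by
  intro number check_number _
  unfold Spec_number_inside number_inside number_inside_alt
  have hneed : ∀ c, ((check_number.toList.count c : Int))
      = (check_number.toList.foldl (fun (d : PySem.Dict Char Int) c => d.insert c (d.getD c 0 + 1)) PySem.Dict.empty).getD c 0 := by
    intro c
    rw [PySem.Dict.foldl_insert_getD_add_one_eq_counter, PySem.Dict.getD_counter]
  have hlen0 : ((check_number.toList.length : Int)) = (PySem.Str.len check_number : Int) := by
    simp [PySem.Str.len_eq]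
  obtain ⟨h1, h2, h3⟩ := pvJoint number.toList check_number.toList _ _ [] hneed hlen0
  simp only []
  by_cases hz : (number.toList.foldl (fun check letter => if check.length ≠ 0 then pvRemoveFirst check letter else check) check_number.toList).length = 0
  · rw [if_pos hz]
    have hrem : ¬ ((number.toList.foldl (fun (s : PySem.Dict Char Int × Int × List Char) c =>
            if s.1.getD c 0 > 0 then (s.1.insert c (s.1.getD c 0 - 1), s.2.1 - 1, s.2.2)
            else (s.1, s.2.1, s.2.2 ++ [c]))
            ((check_number.toList.foldl (fun (d : PySem.Dict Char Int) c => d.insert c (d.getD c 0 + 1)) PySem.Dict.empty),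
             (PySem.Str.len check_number : Int), ([] : List Char))).2.1 ≠ 0) := by
      rw [← h2]
      simp only [ne_eq, not_not]
      exact_mod_cast hz
    rw [if_neg hrem]
    rw [h3, pvFold_removeFirst_eq_kept]
    simp
  · rw [if_neg hz]
    have hrem : ((number.toList.foldl (fun (s : PySem.Dict Char Int × Int × List Char) c =>
            if s.1.getD c 0 > 0 then (s.1.insert c (s.1.getD c 0 - 1), s.2.1 - 1, s.2.2)
            else (s.1, s.2.1, s.2.2 ++ [c]))
            ((check_number.toList.foldl (fun (d : PySem.Dict Char Int) c => d.insert c (d.getD c 0 + 1)) PySem.Dict.empty),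
             (PySem.Str.len check_number : Int), ([] : List Char))).2.1 ≠ 0) := by
      rw [← h2]; exact_mod_cast hz
    rw [if_pos hrem]
    simp
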